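-- pv_equiv track=rewrite | github.com/lcmonteiro/advent-of-code | 2022/d08.py | visible_1
-- ===== SOURCE A (Python) =====
-- def visible_1(row):
--       maximum = -1
--       result  = []
--       for height in row:
--         if height > maximum:
--           maximum = height
--           result.append(True)
--         else:
--           result.append(False)
--       return result
-- ===== SOURCE B (Python) =====
-- def visible_1(row):
--     # divide and conquer: solve each half independently; a right-half element
--     # stays visible overall only if it also beats the whole left half's max
--     if len(row) < 2:
--         return [h > -1 for h in row]
--     mid = len(row) // 2
--     left, right = row[:mid], row[mid:]
--     lres = visible_1(left)
--     rres = visible_1(right)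
--     lmax = max(left)
--     return lres + [r and h > lmax for h, r in zip(right, rres)]
-- ===== Notes on version B (the rewrite author's own statement) =====
-- stated objective: alternative
-- what changed: Replaces the stateful left-to-right running-max loop with a divide-and-conquer recursion: solve both halves independently, then mask the right half's answers by comparison against the left half's maximum.
import Mathlib
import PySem

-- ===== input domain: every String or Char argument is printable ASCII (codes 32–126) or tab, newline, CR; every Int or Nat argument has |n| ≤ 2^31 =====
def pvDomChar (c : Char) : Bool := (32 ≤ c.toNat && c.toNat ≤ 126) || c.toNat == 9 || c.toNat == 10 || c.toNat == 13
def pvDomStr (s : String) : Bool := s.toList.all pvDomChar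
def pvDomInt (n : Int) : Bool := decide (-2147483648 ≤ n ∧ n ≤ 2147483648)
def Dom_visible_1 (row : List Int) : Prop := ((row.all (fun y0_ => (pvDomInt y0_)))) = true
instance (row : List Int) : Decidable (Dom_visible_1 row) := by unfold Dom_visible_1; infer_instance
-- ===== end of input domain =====

-- B replaces A's stateful running-max loop with a divide-and-conquer recursion on halves (solve each half, mask the right half by the left half's max).


-- ===== PORT A =====
-- literal transliteration: loop carrying (maximum, result), appending True/False
def visible_1 (row : List Int) : List Bool :=
  (row.foldl (fun (st : Int × List Bool) height =>
    if height > st.1 then (height, st.2 ++ [true]) else (st.1, st.2 ++ [false]))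
    (-1, [])).2

-- ===== PORT B =====
-- termination facts for the two half slices (cited in decreasing_by)
theorem pv_take_len_lt (row : List Int) (h : ¬ row.length < 2) :
    (PySem.List.slice row none (some (PySem.Int.floordiv (row.length : Int) 2))).length < row.length := by
  rw [PySem.Int.floordiv_eq_ediv_of_pos (by omega), PySem.List.slice_to]
  · simp only [List.length_take]; omega
  · omega

theorem pv_drop_len_lt (row : List Int) (h : ¬ row.length < 2) :
    (PySem.List.slice row (some (PySem.Int.floordiv (row.length : Int) 2)) none).length < row.length := by
  rw [PySem.Int.floordiv_eq_ediv_of_pos (by omega), PySem.List.slice_from]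
  · simp only [List.length_drop]; omega
  · omega

-- divide and conquer, transliterating Source B
def visible_1_alt (row : List Int) : List Bool :=
  if h2 : row.length < 2 then row.map (fun h => decide (h > -1))
  else
    let mid := PySem.Int.floordiv (row.length : Int) 2
    let left := PySem.List.slice row none (some mid)
    let right := PySem.List.slice row (some mid) none
    let lres := visible_1_alt left
    let rres := visible_1_alt right
    -- max(left): left is provably nonempty here, so max? is `some`; getD's default is never used
    let lmax := (PySem.List.max? left (fun x => x)).getD 0
    lres ++ List.zipWith (fun h r => r && decide (h > lmax)) right rres
termination_by row.length
decreasing_by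
  · exact pv_take_len_lt row h2
  · exact pv_drop_len_lt row h2

-- ===== PRECONDITION & SPEC =====
def Spec_visible_1 (row : List Int) (out : List Bool) : Prop := out = visible_1_alt row
instance (row : List Int) (out : List Bool) : Decidable (Spec_visible_1 row out) := by unfold Spec_visible_1; infer_instance

-- ===== CLAIM =====
def Claim_equal_visible_1 : Prop := ∀ (row : List Int), Dom_visible_1 row → Spec_visible_1 row (visible_1 row)

-- ===== LEMMAS AND PROOFS =====
-- common recursive specification: emit (h > m), continue with max m h
def pvSpecGo : Int → List Int → List Bool
  | _, [] => []
  | m, h :: t => decide (h > m) :: pvSpecGo (max m h) t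

theorem visible_1_loop (row : List Int) (m : Int) (acc : List Bool) :
    (row.foldl (fun (st : Int × List Bool) height =>
      if height > st.1 then (height, st.2 ++ [true]) else (st.1, st.2 ++ [false]))
      (m, acc)).2 = acc ++ pvSpecGo m row := by
  induction row generalizing m acc with
  | nil => simp [pvSpecGo]
  | cons h t ih =>
    simp only [List.foldl_cons, pvSpecGo]
    by_cases hc : h > m
    · have hm : max m h = h := by omega
      simp [hc, hm, ih]
    · have hm : max m h = m := by omega
      simp [hc, hm, ih]

theorem pvSpecGo_append (l r : List Int) (m : Int) :
    pvSpecGo m (l ++ r) = pvSpecGo m l ++ pvSpecGo (l.foldl max m) r := by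
  induction l generalizing m with
  | nil => simp [pvSpecGo]
  | cons x t ih => simp [pvSpecGo, ih]

theorem pv_foldl_max_comm (l : List Int) (a b : Int) :
    l.foldl max (max a b) = max a (l.foldl max b) := by
  induction l generalizing b with
  | nil => simp
  | cons c t ih => simp only [List.foldl_cons, max_assoc, ih]

theorem pv_zip_spec (xs : List Int) (m₁ m₂ : Int) :
    List.zipWith (fun h r => r && decide (h > m₂)) xs (pvSpecGo m₁ xs)
      = pvSpecGo (max m₁ m₂) xs := by
  induction xs generalizing m₁ with
  | nil => simp [pvSpecGo]
  | cons x t ih =>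
    simp only [pvSpecGo, List.zipWith_cons_cons, ih, max_right_comm]
    congr 1
    simp [Bool.and_comm]

theorem pv_alt_eq_specGo_aux : ∀ (n : Nat) (row : List Int), row.length ≤ n →
    visible_1_alt row = pvSpecGo (-1) row := by
  intro n
  induction n with
  | zero =>
    intro row hr
    have hrow : row = [] := by cases row <;> simp_all
    subst hrow
    rw [visible_1_alt]
    simp [pvSpecGo]
  | succ n ih =>
    intro row hr
    rw [visible_1_alt]
    by_cases h2 : row.length < 2
    · simp only [dif_pos h2]
      match row, h2 with
      | [], _ => simp [pvSpecGo]
      | [h], _ => simp [pvSpecGo]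
    · simp only [dif_neg h2]
      have e0 : PySem.Int.floordiv ((row.length : Int)) 2 = ((row.length / 2 : Nat) : Int) := by
        rw [PySem.Int.floordiv_eq_ediv_of_pos (by omega)]
        omega
      rw [e0, PySem.List.slice_to_natCast, PySem.List.slice_from_natCast]
      rw [ih _ (by simp only [List.length_take]; omega),
          ih _ (by simp only [List.length_drop]; omega)]
      obtain ⟨x, t, hx⟩ : ∃ x t, row.take (row.length / 2) = x :: t := by
        cases hc : row.take (row.length / 2) with
        | nil =>
          exfalso
          have := congrArg List.length hc
          simp only [List.length_take, List.length_nil] at this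
          omega
        | cons a b => exact ⟨a, b, rfl⟩
      have hm2 : (PySem.List.max? (row.take (row.length / 2)) (fun y => y)).getD 0
          = t.foldl max x := by
        rw [hx, PySem.List.max?_id_cons]
        rfl
      rw [hm2, pv_zip_spec]
      have hfold : (row.take (row.length / 2)).foldl max (-1) = max (-1) (t.foldl max x) := by
        rw [hx, List.foldl_cons, ← pv_foldl_max_comm]
      rw [← hfold, ← pvSpecGo_append, List.take_append_drop]

theorem pv_alt_eq_specGo (row : List Int) : visible_1_alt row = pvSpecGo (-1) row :=
  pv_alt_eq_specGo_aux row.length row (le_refl _)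

-- ===== VERDICT =====
theorem visible_1_spec : Claim_equal_visible_1 := by
  intro row _
  show visible_1 row = visible_1_alt row
  rw [visible_1, visible_1_loop row (-1) [], List.nil_append, pv_alt_eq_specGo]
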